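-- pv_equiv track=rewrite | github.com/Hassan14120/rebuild_sentences_script | index.py | rebuild_sentence
-- ===== SOURCE A (Python) =====
-- def rebuild_sentence(words, lengths):
--     sentence_rebuilded = []
--     for length in lengths:
--         for word in words:
--             if len(word) == length:
--                 sentence_rebuilded.append(word)
--                 words.remove(word)
--                 break
--     return ' '.join(sentence_rebuilded)
-- ===== SOURCE B (Python) =====
-- def rebuild_sentence(words, lengths):
--     # Index words once into FIFO queues keyed by length; one pop per requested length.
--     queues = {}
--     for w in words:
--         queues.setdefault(len(w), []).append(w)
--     out = []
--     for L in lengths: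
--         q = queues.get(L, [])
--         if q:
--             out.append(q.pop(0))
--     return ' '.join(out)
-- ===== Notes on version B (the rewrite author's own statement) =====
-- stated objective: faster
-- what changed: Replaces the per-length linear scan with list.remove over the mutable word list by a one-pass index from word length to a FIFO queue, popping the front queue entry per requested length.
import Mathlib
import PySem

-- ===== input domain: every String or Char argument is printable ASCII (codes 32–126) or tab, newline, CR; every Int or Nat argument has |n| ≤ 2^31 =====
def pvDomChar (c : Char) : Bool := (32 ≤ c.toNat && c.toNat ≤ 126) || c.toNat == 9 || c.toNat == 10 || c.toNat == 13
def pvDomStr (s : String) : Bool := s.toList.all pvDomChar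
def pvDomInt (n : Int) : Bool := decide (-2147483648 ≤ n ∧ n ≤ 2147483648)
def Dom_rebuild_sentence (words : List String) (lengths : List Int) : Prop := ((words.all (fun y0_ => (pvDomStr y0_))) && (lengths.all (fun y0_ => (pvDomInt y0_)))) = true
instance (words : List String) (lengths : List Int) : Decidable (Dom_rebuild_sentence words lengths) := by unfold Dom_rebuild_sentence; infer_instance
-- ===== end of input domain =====

-- ===== PORT A =====
-- B replaces A's per-length scan + list.remove with a length->FIFO-queue index built in one pass (faster).
-- Equivalence is about the RETURN value only: Python A destructively removes matched words from `words`; B does not.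
-- inner loop: 'for word in words: if len(word)==length: append; words.remove(word); break'
def pyFindRemove (orig : List String) (rest : List String) (length : Int) :
    List String × Option String :=
  match rest with
  | [] => (orig, none)
  | w :: t =>
    if PySem.Str.len w = length then
      ((PySem.List.remove? orig w).getD orig, some w)
    else pyFindRemove orig t length

def rebuild_sentence (words : List String) (lengths : List Int) : String :=
  PySem.Str.join " "
    (lengths.foldl
      (fun (st : List String × List String) length =>
        match pyFindRemove st.1 st.1 length with
        | (ws', some w) => (ws', st.2 ++ [w])
        | (ws', none) => (ws', st.2))
      (words, [])).2

-- ===== PORT B =====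
def rebuild_sentence_alt (words : List String) (lengths : List Int) : String :=
  -- queues.setdefault(len(w), []).append(w)
  let queues : PySem.Dict Int (List String) :=
    words.foldl (fun d w => d.modify (PySem.Str.len w) [] (fun q => q ++ [w])) PySem.Dict.empty
  -- q = queues.get(L, []); if q: out.append(q.pop(0))
  PySem.Str.join " "
    (lengths.foldl
      (fun (st : PySem.Dict Int (List String) × List String) L =>
        match st.1.getD L [] with
        | [] => st
        | x :: t => (st.1.insert L t, st.2 ++ [x]))
      (queues, [])).2

-- ===== PRECONDITION & SPEC =====
def Spec_rebuild_sentence (words : List String) (lengths : List Int) (out : String) : Prop := out = rebuild_sentence_alt words lengths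
instance (words : List String) (lengths : List Int) (out : String) : Decidable (Spec_rebuild_sentence words lengths out) := by unfold Spec_rebuild_sentence; infer_instance

-- ===== CLAIM (what is proved, stated in full; the proofs are below) =====
def Claim_equal_rebuild_sentence : Prop := ∀ (words : List String) (lengths : List Int), Dom_rebuild_sentence words lengths → Spec_rebuild_sentence words lengths (rebuild_sentence words lengths)

-- ===== LEMMAS AND PROOFS =====

-- the two loop bodies, named for the induction
def stepA (st : List String × List String) (length : Int) : List String × List String :=
  match pyFindRemove st.1 st.1 length with
  | (ws', some w) => (ws', st.2 ++ [w])
  | (ws', none) => (ws', st.2)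

def stepB (st : PySem.Dict Int (List String) × List String) (L : Int) :
    PySem.Dict Int (List String) × List String :=
  match st.1.getD L [] with
  | [] => st
  | x :: t => (st.1.insert L t, st.2 ++ [x])

-- state invariant: each queue is the length-filter of A's remaining word list
def QInv (ws : List String) (d : PySem.Dict Int (List String)) : Prop :=
  ∀ M : Int, d.getD M [] = ws.filter (fun w => PySem.Str.len w == M)

lemma pyFindRemove_none (orig rest : List String) (L : Int)
    (h : ∀ w ∈ rest, ¬ (PySem.Str.len w = L)) :
    pyFindRemove orig rest L = (orig, none) := by
  induction rest with
  | nil => rfl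
  | cons w t ih =>
    simp only [pyFindRemove]
    rw [if_neg (h w (by simp))]
    exact ih (fun w hw => h w (by simp [hw]))

lemma pyFindRemove_found (orig : List String) (pre suf : List String) (x : String) (L : Int)
    (hpre : ∀ w ∈ pre, ¬ (PySem.Str.len w = L)) (hx : PySem.Str.len x = L) :
    pyFindRemove orig (pre ++ x :: suf) L = ((PySem.List.remove? orig x).getD orig, some x) := by
  induction pre with
  | nil =>
    rw [List.nil_append]
    simp only [pyFindRemove]
    rw [if_pos hx]
  | cons w t ih =>
    simp only [List.cons_append, pyFindRemove]
    rw [if_neg (hpre w (by simp))]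
    exact ih (fun w hw => hpre w (by simp [hw]))

lemma erase_not_mem_append {x : String} (pre suf : List String) (hx : x ∉ pre) :
    (pre ++ x :: suf).erase x = pre ++ suf := by
  rw [List.erase_append_right _ hx, List.erase_cons_head]

-- one synchronised step preserves the invariant and appends the same word (or nothing)
lemma step_sync (ws : List String) (d : PySem.Dict Int (List String)) (L : Int)
    (hinv : QInv ws d) (acc : List String) :
    QInv (stepA (ws, acc) L).1 (stepB (d, acc) L).1 ∧
      (stepA (ws, acc) L).2 = (stepB (d, acc) L).2 := by
  have hq := hinv L
  cases hfil : ws.filter (fun w => PySem.Str.len w == L) with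
  | nil =>
    have hnone : pyFindRemove ws ws L = (ws, none) := by
      apply pyFindRemove_none
      intro w hw hlen
      have hmem : w ∈ ws.filter (fun w => PySem.Str.len w == L) :=
        List.mem_filter.mpr ⟨hw, by simp only [beq_iff_eq]; exact hlen⟩
      rw [hfil] at hmem
      exact absurd hmem (List.not_mem_nil)
    have hAeq : stepA (ws, acc) L = (ws, acc) := by
      simp only [stepA, hnone]
    have hBeq : stepB (d, acc) L = (d, acc) := by
      simp only [stepB, hq, hfil]
    rw [hAeq, hBeq]
    exact ⟨hinv, rfl⟩
  | cons x t =>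
    obtain ⟨pre, suf, hws, hpre, hx, hsuf⟩ := List.filter_eq_cons_iff.mp hfil
    have hx' : PySem.Str.len x = L := by
      have := hx; simp only [beq_iff_eq] at this; exact this
    have hpre' : ∀ w ∈ pre, ¬ (PySem.Str.len w = L) := by
      intro w hw hlen
      exact hpre w hw (by simp only [beq_iff_eq]; exact hlen)
    have hxpre : x ∉ pre := fun hmem => hpre' x hmem hx'
    have hmem : x ∈ ws := by rw [hws]; simp
    have hrem : PySem.List.remove? ws x = some (ws.erase x) :=
      PySem.List.remove?_eq_some_erase ws x hmem
    have hfound : pyFindRemove ws ws L = (ws.erase x, some x) := by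
      rw [hws] at hrem ⊢
      rw [pyFindRemove_found _ pre suf x L hpre' hx', hrem, Option.getD_some]
    have herase : ws.erase x = pre ++ suf := by
      rw [hws]; exact erase_not_mem_append pre suf hxpre
    have hAeq : stepA (ws, acc) L = (ws.erase x, acc ++ [x]) := by
      simp only [stepA, hfound]
    have hBeq : stepB (d, acc) L = (d.insert L t, acc ++ [x]) := by
      simp only [stepB, hq, hfil]
    rw [hAeq, hBeq]
    refine ⟨fun M => ?_, rfl⟩
    rw [PySem.Dict.getD_insert]
    by_cases hM : M = L
    · subst hM
      rw [if_pos rfl, herase, List.filter_append]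
      have hprenil : pre.filter (fun w => PySem.Str.len w == M) = [] := by
        rw [List.filter_eq_nil_iff]
        intro w hw hcontra
        exact hpre' w hw (by simpa only [beq_iff_eq] using hcontra)
      rw [hprenil, hsuf, List.nil_append]
    · rw [if_neg hM, hinv M, herase, hws, List.filter_append, List.filter_append,
        List.filter_cons, if_neg]
      simp only [beq_iff_eq]
      intro hcontra
      exact hM (by rw [← hcontra, hx'])

lemma fold_sync (lengths : List Int) :
    ∀ (ws : List String) (d : PySem.Dict Int (List String)) (acc : List String),
      QInv ws d →
      (lengths.foldl stepA (ws, acc)).2 = (lengths.foldl stepB (d, acc)).2 := by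
  induction lengths with
  | nil => intro ws d acc _; rfl
  | cons L ls ih =>
    intro ws d acc hinv
    obtain ⟨hinv', hacc⟩ := step_sync ws d L hinv acc
    simp only [List.foldl_cons]
    rw [show stepA (ws, acc) L = ((stepA (ws, acc) L).1, (stepA (ws, acc) L).2) from rfl,
        show stepB (d, acc) L = ((stepB (d, acc) L).1, (stepB (d, acc) L).2) from rfl, hacc]
    exact ih _ _ _ hinv'

lemma inv_init (words : List String) :
    QInv words (words.foldl (fun d w => d.modify (PySem.Str.len w) [] (fun q => q ++ [w])) PySem.Dict.empty) := by
  intro M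
  have hmap : words.foldl (fun d w => d.modify (PySem.Str.len w) [] (fun q => q ++ [w])) PySem.Dict.empty
      = (words.map (fun w => (PySem.Str.len w, w))).foldl
          (fun d p => d.modify p.1 [] (fun q => q ++ [p.2])) PySem.Dict.empty := by
    rw [List.foldl_map]
  rw [hmap, PySem.Dict.getD_foldl_modify_append, PySem.Dict.getD_empty, List.nil_append,
    List.filter_map, List.map_map]
  simp [Function.comp_def]

-- ===== VERDICT (by name: the statement is the Claim_ definition above) =====
theorem rebuild_sentence_spec : Claim_equal_rebuild_sentence := by
  intro words lengths _
  exact congrArg (fun l => PySem.Str.join " " l)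
    (fold_sync lengths words _ [] (inv_init words))
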